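-- pv_equiv track=rewrite | github.com/HybridScale/Entanglement-Cooling-Algorithm | src/dependecies.py | generate_dictionary_adjacent
-- ===== SOURCE A (Python) =====
-- def generate_dictionary_adjacent(N :int, r :int):
--     """ generate the list used evaluate of the von Neuman entropy, and only adjacent spins are to be considered  """
--
--     lista = []
--     r = r - 1
--     for iii in range(0,N):
--         ll_tampon = [(iii ) % (N)]
--         for jjj in range(0,r):
--             ll_tampon.append((iii+jjj+1) % (N))
--
--         for ii in range(0,len(ll_tampon)):
--             ll_tampon[ii] += 1
--         lista.append(ll_tampon)
--
--     return lista
-- ===== SOURCE B (Python) =====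
-- def generate_dictionary_adjacent(N: int, r: int):
--     """Concatenate-and-slice: rows are windows of a precomputed repeated base cycle."""
--     if N <= 0:
--         return []
--     base = list(range(1, N + 1))
--     L = r if r >= 1 else 1
--     ext = base * (((L + N - 1) // N) + 1)
--     return [ext[i:i + L] for i in range(N)]
-- ===== Notes on version B (the rewrite author's own statement) =====
-- stated objective: alternative
-- what changed: Replaces per-element modular index construction (nested loops computing (i+j)%N per entry) by building the base cycle [1..N] once, tiling it into an extended array, and cutting each row out as a contiguous slice ext[i:i+L].
import Mathlib
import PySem

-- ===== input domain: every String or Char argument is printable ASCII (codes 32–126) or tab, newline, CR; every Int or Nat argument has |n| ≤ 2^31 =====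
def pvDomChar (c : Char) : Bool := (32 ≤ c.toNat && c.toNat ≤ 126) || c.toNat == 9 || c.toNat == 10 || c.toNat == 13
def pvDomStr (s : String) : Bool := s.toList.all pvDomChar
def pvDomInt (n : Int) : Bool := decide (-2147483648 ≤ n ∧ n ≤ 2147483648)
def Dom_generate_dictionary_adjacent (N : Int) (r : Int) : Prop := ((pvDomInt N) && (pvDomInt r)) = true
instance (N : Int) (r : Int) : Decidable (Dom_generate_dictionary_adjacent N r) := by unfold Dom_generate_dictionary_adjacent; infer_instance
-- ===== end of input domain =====

-- B replaces A's per-element modular index construction by tiling the base cycle [1..N] and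
-- slicing each row out of the tiled array (objective: alternative decomposition, same cost).

-- ===== PORT A =====
-- the in-place "+1" index loop over ll_tampon is rendered as a map over the same list
def generate_dictionary_adjacent (N : Int) (r : Int) : List (List Int) :=
  let r' := r - 1
  (PySem.List.pyRange 0 N 1).foldl (fun lista iii =>
    let ll0 : List Int := [PySem.Int.mod iii N]
    let ll1 := (PySem.List.pyRange 0 r' 1).foldl
      (fun ll jjj => ll ++ [PySem.Int.mod (iii + jjj + 1) N]) ll0
    let ll2 := ll1.map (fun x => x + 1)
    lista ++ [ll2]) []

-- ===== PORT B =====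
def generate_dictionary_adjacent_alt (N : Int) (r : Int) : List (List Int) :=
  if N ≤ 0 then []
  else
    let base := PySem.List.pyRange 1 (N + 1) 1
    let L : Int := if 1 ≤ r then r else 1
    let ext := PySem.List.pyRepeat base (PySem.Int.floordiv (L + N - 1) N + 1)
    (PySem.List.pyRange 0 N 1).map (fun i => PySem.List.slice ext (some i) (some (i + L)))

-- ===== PRECONDITION & SPEC =====
def Spec_generate_dictionary_adjacent (N : Int) (r : Int) (out : List (List Int)) : Prop := out = generate_dictionary_adjacent_alt N r
instance (N : Int) (r : Int) (out : List (List Int)) : Decidable (Spec_generate_dictionary_adjacent N r out) := by unfold Spec_generate_dictionary_adjacent; infer_instance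

-- ===== CLAIM (what is proved, stated in full; the proofs are below) =====
def Claim_equal_generate_dictionary_adjacent : Prop := ∀ (N : Int) (r : Int), Dom_generate_dictionary_adjacent N r → Spec_generate_dictionary_adjacent N r (generate_dictionary_adjacent N r)

-- ===== LEMMAS AND PROOFS =====

-- canonical row: [(i+j) % N + 1 for j in range(l)]
def pvRow (N : Int) (l : Nat) (i : Int) : List Int :=
  (List.range l).map (fun (j : Nat) => PySem.Int.mod (i + (j : Int)) N + 1)

-- A and B agree on the row length
lemma pvLen_eq (r : Int) : (if 1 ≤ r then r else 1).toNat = (r - 1).toNat + 1 := by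
  split <;> omega

-- A's row for index i is the canonical row
lemma pvRowA (N r i : Int) :
    (([PySem.Int.mod i N] ++
        (PySem.List.pyRange 0 (r - 1) 1).map (fun jjj => PySem.Int.mod (i + jjj + 1) N)).map
      (fun x => x + 1))
      = pvRow N ((r - 1).toNat + 1) i := by
  rw [PySem.List.pyRange_one]
  unfold pvRow
  rw [List.range_succ_eq_map]
  simp only [List.map_map, List.map_cons, List.cons_append, List.nil_append, sub_zero]
  congr 1
  · simp
  · refine List.map_congr_left (fun k _ => ?_)
    simp only [Function.comp_apply, Nat.succ_eq_add_one]
    congr 2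
    push_cast
    ring

-- A computes the canonical rows
lemma A_eq_canon (N r : Int) :
    generate_dictionary_adjacent N r
      = (PySem.List.pyRange 0 N 1).map (fun i => pvRow N ((r - 1).toNat + 1) i) := by
  unfold generate_dictionary_adjacent
  simp only [PySem.List.foldl_append_singleton_eq_map, List.nil_append]
  exact List.map_congr_left (fun i _ => pvRowA N r i)

-- the tiled array, elementwise
lemma pvRepeat_eq (xs : List Int) (k n : Nat)
    (hn : xs = (List.range n).map (fun (m : Nat) => ((m : Int) + 1))) :
    (List.replicate k xs).flatten
      = (List.range (k * n)).map (fun (m : Nat) => ((m % n : Nat) : Int) + 1) := by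
  induction k with
  | zero => simp
  | succ k ih =>
    rw [List.replicate_succ', List.flatten_append, ih]
    have hkn : (k + 1) * n = k * n + n := by ring
    rw [hkn, List.range_add, List.map_append]
    congr 1
    simp only [List.flatten_cons, List.flatten_nil, List.append_nil]
    rw [hn, List.map_map]
    refine List.map_congr_left (fun m hm => ?_)
    have hmn : m < n := List.mem_range.mp hm
    have h2 : (k * n + m) % n = m := by
      rw [Nat.add_comm (k * n) m, Nat.add_mul_mod_self_right, Nat.mod_eq_of_lt hmn]
    simp only [Function.comp_apply, h2]

-- slice of a range-map is a shifted range-map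
lemma pvSlice_map_range (f : Nat → Int) (M : Nat) (a L : Int)
    (ha : 0 <= a) (hL : 0 <= L) (hM : a.toNat + L.toNat <= M) :
    PySem.List.slice ((List.range M).map f) (some a) (some (a + L))
      = (List.range L.toNat).map (fun j => f (a.toNat + j)) := by
  rw [PySem.List.slice_toNat _ ha (by omega)]
  have hsub : (a + L).toNat - a.toNat = L.toNat := by omega
  rw [hsub]
  apply List.ext_getElem
  · simp; omega
  · intro idx h1 h2
    simp only [List.getElem_take, List.getElem_drop, List.getElem_map, List.getElem_range]

-- B's row for 0 <= i < N is the canonical row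
lemma pvRowB (N r i : Int) (hN : 0 < N) (hi0 : 0 <= i) (hiN : i < N) :
    PySem.List.slice
        (PySem.List.pyRepeat (PySem.List.pyRange 1 (N + 1) 1)
          (PySem.Int.floordiv ((if 1 <= r then r else 1) + N - 1) N + 1))
        (some i) (some (i + (if 1 <= r then r else 1)))
      = pvRow N ((r - 1).toNat + 1) i := by
  have hNn : N = (N.toNat : Int) := (Int.toNat_of_nonneg (le_of_lt hN)).symm
  set L : Int := if 1 <= r then r else 1 with hLdef
  have hL1 : 1 <= L := by rw [hLdef]; split <;> omega
  set fd : Int := PySem.Int.floordiv (L + N - 1) N with hfddef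
  have hfd : fd = (L + N - 1) / N := PySem.Int.floordiv_eq_ediv_of_pos hN
  have hdm := Int.mul_ediv_add_emod (L + N - 1) N
  have hlt := Int.emod_lt_of_pos (L + N - 1) hN
  have hge := Int.emod_nonneg (L + N - 1) (ne_of_gt hN)
  have hfd0 : 0 <= fd := by rw [hfd]; exact Int.ediv_nonneg (by omega) (le_of_lt hN)
  have hbound : L + N <= (fd + 1) * N := by rw [hfd]; nlinarith [hdm, hlt]
  have hbase : PySem.List.pyRange 1 (N + 1) 1
      = (List.range N.toNat).map (fun (m : Nat) => ((m : Int) + 1)) := by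
    rw [PySem.List.pyRange_one]
    have h1 : N + 1 - 1 = N := by ring
    rw [h1]
    exact List.map_congr_left (fun k _ => by ring)
  have hext : PySem.List.pyRepeat (PySem.List.pyRange 1 (N + 1) 1) (fd + 1)
      = (List.range ((fd + 1).toNat * N.toNat)).map
          (fun (m : Nat) => ((m % N.toNat : Nat) : Int) + 1) :=
    pvRepeat_eq _ (fd + 1).toNat N.toNat hbase
  have hM : i.toNat + L.toNat <= (fd + 1).toNat * N.toNat := by
    have h1 : ((fd + 1).toNat * N.toNat : Int) = (fd + 1) * N := by
      push_cast [Int.toNat_of_nonneg (by omega : (0:Int) <= fd + 1),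
        Int.toNat_of_nonneg (le_of_lt hN)]
      ring
    have h2 : (i.toNat + L.toNat : Int) <= ((fd + 1).toNat * N.toNat : Int) := by
      rw [h1]
      push_cast [Int.toNat_of_nonneg hi0, Int.toNat_of_nonneg (by omega : (0:Int) <= L)]
      linarith
    exact_mod_cast h2
  rw [hext, pvSlice_map_range _ _ i L hi0 (by omega) hM, <- pvLen_eq r]
  unfold pvRow
  refine List.map_congr_left (fun j hj => ?_)
  congr 1
  have hij : i + (j : Int) = ((i.toNat + j : Nat) : Int) := by
    push_cast [Int.toNat_of_nonneg hi0]
    ring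
  rw [hij, hNn, PySem.Int.mod_natCast]
  simp

-- ===== VERDICT (by name: the statement is the Claim_ definition above) =====
theorem generate_dictionary_adjacent_spec : Claim_equal_generate_dictionary_adjacent := by
  intro N r _
  unfold Spec_generate_dictionary_adjacent generate_dictionary_adjacent_alt
  by_cases hN : N <= 0
  · rw [if_pos hN, A_eq_canon, PySem.List.pyRange_one]
    have h0 : (N - 0).toNat = 0 := by omega
    rw [h0]
    simp
  · rw [if_neg hN, A_eq_canon]
    refine List.map_congr_left (fun i hi => ?_)
    have hmem := (PySem.List.mem_pyRange_one).mp hi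
    exact (pvRowB N r i (by omega) hmem.1 hmem.2).symm
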